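-- pv_equiv track=rewrite | github.com/sebastian-vogt-cs/bachelors-thesis | jupyter/modules/measures.py | phi
-- ===== SOURCE A (Python) =====
-- def phi(i, j, k, n, s):
--     if i > n:
--         return k
--     elif j == 0 and s[i - 1] != 0:
--         return phi(i + 1, i, k + 1, n, s)
--     elif j > 0 and s[i - 1] != 0 and s[i - 1] != s[j - 1]:
--         return phi(i + 1, i, k + 1, n, s)
--     else:
--         return phi(i + 1, j, k, n, s)
-- ===== SOURCE B (Python) =====
-- def phi(i, j, k, n, s):
--     t = i
--     while t <= n:
--         if (j == 0 and s[t - 1] != 0) or (j > 0 and s[t - 1] != 0 and s[t - 1] != s[j - 1]):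
--             j = t
--             k += 1
--         t += 1
--     return k
-- ===== Notes on version B (the rewrite author's own statement) =====
-- stated objective: simpler
-- what changed: Replaces A's tail recursion (a fresh call per element, threading i/j/k through arguments) with a single while-loop that updates j and k in place; same branch conditions and short-circuit indexing, so B raises exactly where A raises; no deep call stack.
-- outside the precondition, e.g. on phi(-3, 3, 0, 5, [-2, 2, 1, -1]): A returns 1, B returns 1; on phi(-2, 0, 0, 6, [2, 1, -1, -2, -2]): A returns 1, B returns 1
import Mathlib
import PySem

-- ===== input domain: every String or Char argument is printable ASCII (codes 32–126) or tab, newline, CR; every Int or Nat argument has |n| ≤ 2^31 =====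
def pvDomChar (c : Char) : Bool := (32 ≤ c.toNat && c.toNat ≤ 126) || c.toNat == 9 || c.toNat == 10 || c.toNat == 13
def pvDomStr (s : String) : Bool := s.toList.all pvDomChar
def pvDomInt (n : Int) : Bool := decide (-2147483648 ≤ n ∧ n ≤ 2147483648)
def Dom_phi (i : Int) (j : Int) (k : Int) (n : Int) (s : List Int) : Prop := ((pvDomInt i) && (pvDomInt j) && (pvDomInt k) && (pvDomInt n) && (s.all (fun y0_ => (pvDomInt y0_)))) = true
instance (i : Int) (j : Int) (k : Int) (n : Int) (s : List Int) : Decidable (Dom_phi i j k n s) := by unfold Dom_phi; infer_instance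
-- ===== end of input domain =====

-- B replaces A's tail recursion by a single while-loop updating j and k in place, with the
-- same branch conditions and the same short-circuit indexing (objective: simpler — no call stack).

-- ===== PORT A =====
def phi (i : Int) (j : Int) (k : Int) (n : Int) (s : List Int) : Int :=
  if n < i then k
  else if j = 0 ∧ PySem.List.pyGetD s (i - 1) 0 ≠ 0 then
    phi (i + 1) i (k + 1) n s
  else if 0 < j ∧ PySem.List.pyGetD s (i - 1) 0 ≠ 0 ∧
      PySem.List.pyGetD s (i - 1) 0 ≠ PySem.List.pyGetD s (j - 1) 0 then
    phi (i + 1) i (k + 1) n s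
  else
    phi (i + 1) j k n s
termination_by (n + 1 - i).toNat
decreasing_by all_goals omega

-- ===== PORT B =====
-- body of Source B's while-loop: state is the pair (j, k), t the loop counter
def phiStep (s : List Int) (st : Int × Int) (t : Int) : Int × Int :=
  if (st.1 = 0 ∧ PySem.List.pyGetD s (t - 1) 0 ≠ 0) ∨
      (0 < st.1 ∧ PySem.List.pyGetD s (t - 1) 0 ≠ 0 ∧
        PySem.List.pyGetD s (t - 1) 0 ≠ PySem.List.pyGetD s (st.1 - 1) 0) then
    (t, st.2 + 1)
  else st

def phi_alt (i : Int) (j : Int) (k : Int) (n : Int) (s : List Int) : Int :=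
  ((PySem.List.pyRange i (n + 1) 1).foldl (phiStep s) (j, k)).2

-- ===== PRECONDITION & SPEC =====
-- A and B have identical branches and access order, so both raise IndexError on exactly the
-- same inputs; Pre_ excludes a sound closed-form superset of these raising inputs: it keeps
-- inputs where no element position can go out of range (or where j < 0 / n < i, so nothing is
-- ever indexed), and where an initial j beyond the list is never consulted; the exact raising
-- set is not closed-form because a negative start i can park j on a negative position and
-- silence all later indexing — those few returning inputs (where A = B anyway) are excluded.
def Pre_phi (i : Int) (j : Int) (k : Int) (n : Int) (s : List Int) : Prop :=
  j < 0 ∨ n < i ∨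
    (-(s.length : Int) ≤ i - 1 ∧ n ≤ (s.length : Int) ∧
      (j ≤ (s.length : Int) ∨
        ∀ t ∈ PySem.List.pyRange i (n + 1) 1, PySem.List.pyGetD s (t - 1) 0 = 0))
instance (i : Int) (j : Int) (k : Int) (n : Int) (s : List Int) : Decidable (Pre_phi i j k n s) := by
  unfold Pre_phi; infer_instance

def pvWitness_phi : Int × Int × Int × Int × List Int := (1, 0, 0, 3, [1, 0, 2])

def Spec_phi (i : Int) (j : Int) (k : Int) (n : Int) (s : List Int) (out : Int) : Prop := out = phi_alt i j k n s
instance (i : Int) (j : Int) (k : Int) (n : Int) (s : List Int) (out : Int) : Decidable (Spec_phi i j k n s out) := by unfold Spec_phi; infer_instance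

-- ===== CLAIM (what is proved, stated in full; the proofs are below) =====
def Claim_equal_phi : Prop := ∀ (i : Int) (j : Int) (k : Int) (n : Int) (s : List Int), Dom_phi i j k n s → Pre_phi i j k n s → Spec_phi i j k n s (phi i j k n s)

-- ===== LEMMAS AND PROOFS =====

-- The two ports agree on every input (both are total via pyGetD's default).
lemma phi_eq_foldl (s : List Int) :
    ∀ (m : Nat) (i j k n : Int), (n + 1 - i).toNat = m →
      phi i j k n s = ((PySem.List.pyRange i (n + 1) 1).foldl (phiStep s) (j, k)).2 := by
  intro m
  induction m with
  | zero =>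
    intro i j k n hm
    have h : n < i := by omega
    rw [phi, PySem.List.pyRange_one_eq_nil (by omega)]
    simp [h]
  | succ m ih =>
    intro i j k n hm
    have h : ¬ n < i := by omega
    rw [phi, PySem.List.pyRange_one_cons (by omega : i < n + 1)]
    simp only [List.foldl_cons, if_neg h]
    have hstep : phiStep s (j, k) i =
        if (j = 0 ∧ PySem.List.pyGetD s (i - 1) 0 ≠ 0) ∨
            (0 < j ∧ PySem.List.pyGetD s (i - 1) 0 ≠ 0 ∧
              PySem.List.pyGetD s (i - 1) 0 ≠ PySem.List.pyGetD s (j - 1) 0)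
        then (i, k + 1) else (j, k) := rfl
    by_cases hc : (j = 0 ∧ PySem.List.pyGetD s (i - 1) 0 ≠ 0) ∨
        (0 < j ∧ PySem.List.pyGetD s (i - 1) 0 ≠ 0 ∧
          PySem.List.pyGetD s (i - 1) 0 ≠ PySem.List.pyGetD s (j - 1) 0)
    · rw [hstep, if_pos hc]
      rcases hc with h1 | h2
      · rw [if_pos h1]
        exact ih (i + 1) i (k + 1) n (by omega)
      · rw [if_neg (by rintro ⟨h0, -⟩; omega), if_pos h2]
        exact ih (i + 1) i (k + 1) n (by omega)
    · rw [hstep, if_neg hc]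
      rw [if_neg (fun h1 => hc (Or.inl h1)), if_neg (fun h2 => hc (Or.inr h2))]
      exact ih (i + 1) j k n (by omega)

-- ===== VERDICT (by name: the statement is the Claim_ definition above) =====
theorem phi_spec : Claim_equal_phi := by
  intro i j k n s _ _
  unfold Spec_phi phi_alt
  exact phi_eq_foldl s (n + 1 - i).toNat i j k n rfl
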